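-- pv_equiv track=rewrite | github.com/gwelby/quantum_collaborative | quantum_field/consciousness_interface.py | _get_dominant_items
-- ===== SOURCE A (Python) =====
-- from typing import Dict, List, Optional, Tuple, Union
--
-- def _get_dominant_items(items: List[str], threshold: int = 3) -> List[str]:
--     """
--     Extract items that appear frequently in a list.
--
--     Args:
--         items: List of strings
--         threshold: Minimum occurrences to be considered dominant
--
--     Returns:
--         List of dominant items
--     """
--     if not items:
--         return []
--
--     # Count occurrences
--     counts = {}
--     for item in items:
--         if item:
--             counts[item] = counts.get(item, 0) + 1
--
--     # Filter by threshold
--     dominant = [item for item, count in counts.items() if count >= threshold]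
--
--     return dominant
-- ===== SOURCE B (Python) =====
-- def _get_dominant_items(items, threshold=3):
--     """Repeatedly extract the first remaining item, remove every copy of it,
--     and measure its frequency as the shrink in list length; no count table."""
--     dominant = []
--     rest = list(items)
--     while rest:
--         head = rest[0]
--         remaining = [x for x in rest[1:] if x != head]
--         if head and len(rest) - len(remaining) >= threshold:
--             dominant.append(head)
--         rest = remaining
--     return dominant
-- ===== Notes on version B (the rewrite author's own statement) =====
-- stated objective: alternative
-- what changed: B keeps no count table at all: it repeatedly takes the first remaining item, strips every copy of it from the worklist, and obtains that item's frequency as the drop in list length, emitting it if the drop reaches the threshold.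
import Mathlib
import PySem

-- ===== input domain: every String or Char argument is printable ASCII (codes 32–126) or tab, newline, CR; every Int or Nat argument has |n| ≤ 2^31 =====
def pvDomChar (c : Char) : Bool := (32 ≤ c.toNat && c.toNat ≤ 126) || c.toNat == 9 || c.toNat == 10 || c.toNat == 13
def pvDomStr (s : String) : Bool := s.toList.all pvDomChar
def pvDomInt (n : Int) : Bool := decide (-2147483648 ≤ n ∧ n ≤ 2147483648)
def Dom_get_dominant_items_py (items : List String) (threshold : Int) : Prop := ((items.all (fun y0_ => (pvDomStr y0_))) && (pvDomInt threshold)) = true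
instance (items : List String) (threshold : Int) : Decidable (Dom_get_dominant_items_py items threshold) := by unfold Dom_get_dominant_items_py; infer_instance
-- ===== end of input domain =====

-- B keeps no count table: it repeatedly extracts the first remaining item, removes every copy
-- of it from the worklist, and reads the item's frequency off the length drop (objective: alternative).


-- ===== PORT A =====
-- 'if not items: return []'; then counts[item] = counts.get(item, 0) + 1 for truthy items;
-- then keep the keys whose count reaches threshold, in dict (= first-appearance) order.
def get_dominant_items_py (items : List String) (threshold : Int) : List String :=
  if items = [] then []
  else
    let counts : PySem.Dict String Int :=
      items.foldl
        (fun d item => if item ≠ "" then d.insert item (d.getD item 0 + 1) else d)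
        PySem.Dict.empty
    (counts.items.filter (fun p => threshold ≤ p.2)).map (·.1)

-- ===== PORT B =====
-- while rest: head = rest[0]; remaining = [x for x in rest[1:] if x != head];
--             if head and len(rest) - len(remaining) >= threshold: dominant.append(head); rest = remaining
def pvAltLoop (threshold : Int) (dominant : List String) (rest : List String) : List String :=
  match rest with
  | [] => dominant
  | head :: tail =>
    let remaining := tail.filter (fun x => x ≠ head)
    if head ≠ "" ∧ threshold ≤ ((tail.length + 1 : Int) - remaining.length)
    then pvAltLoop threshold (dominant ++ [head]) remaining
    else pvAltLoop threshold dominant remaining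
termination_by rest.length
decreasing_by
  all_goals
    simp only [List.length_unattach]
    exact Nat.lt_succ_of_le (le_trans (List.length_filter_le _ _) (le_of_eq (List.length_attach)))

def get_dominant_items_py_alt (items : List String) (threshold : Int) : List String :=
  pvAltLoop threshold [] items

-- ===== PRECONDITION & SPEC =====
def Spec_get_dominant_items_py (items : List String) (threshold : Int) (out : List String) : Prop := out = get_dominant_items_py_alt items threshold
instance (items : List String) (threshold : Int) (out : List String) : Decidable (Spec_get_dominant_items_py items threshold out) := by unfold Spec_get_dominant_items_py; infer_instance

-- ===== CLAIM (what is proved, stated in full; the proofs are below) =====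
def Claim_equal_get_dominant_items_py : Prop := ∀ (items : List String) (threshold : Int), Dom_get_dominant_items_py items threshold → Spec_get_dominant_items_py items threshold (get_dominant_items_py items threshold)

-- ===== LEMMAS AND PROOFS =====

-- Both programs compute (dedup items).filter (fun k => k ≠ "" ∧ count items k ≥ threshold);
-- the lemmas below characterise each side by that expression.

-- Set.ofList commutes with filter (first-occurrence dedup of a filtered list
-- = filter of the first-occurrence dedup).
theorem pv_foldl_add_filter (p : String → Bool) (xs : List String) : ∀ (acc : List String),
    List.foldl PySem.Set.add (acc.filter p) (xs.filter p) = (List.foldl PySem.Set.add acc xs).filter p := by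
  induction xs with
  | nil => intro acc; rfl
  | cons x xs ih =>
    intro acc
    by_cases hm : x ∈ acc
    · by_cases hp : p x
      · have hmf : x ∈ acc.filter p := List.mem_filter.2 ⟨hm, hp⟩
        simp [hp, PySem.Set.add, hm, hmf, ih]
      · simp [hp, PySem.Set.add, hm, ih]
    · by_cases hp : p x
      · have hmf : x ∉ acc.filter p := fun h => hm (List.mem_filter.1 h).1
        have h2 : (acc ++ [x]).filter p = acc.filter p ++ [x] := by simp [List.filter_append, hp]
        simp only [List.filter_cons, hp, if_true, List.foldl_cons, PySem.Set.add,
          PySem.Set.contains]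
        simp only [List.contains_eq_mem, hm, hmf, decide_false, Bool.false_eq_true, if_false]
        rw [← ih (acc ++ [x]), h2]
      · have h2 : (acc ++ [x]).filter p = acc.filter p := by simp [List.filter_append, hp]
        simp only [List.filter_cons, hp, Bool.false_eq_true, if_false, List.foldl_cons,
          PySem.Set.add, PySem.Set.contains]
        simp only [List.contains_eq_mem, hm, decide_false, Bool.false_eq_true, if_false]
        rw [← ih (acc ++ [x]), h2]

-- A's counting loop skips falsy items: it is the counting fold over the truthy sublist.
theorem pv_foldl_skip_falsy (l : List String) : ∀ (d : PySem.Dict String Int),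
    l.foldl (fun d item => if item ≠ "" then d.insert item (d.getD item 0 + 1) else d) d
      = (l.filter (fun x => decide (x ≠ ""))).foldl (fun d x => d.insert x (d.getD x 0 + 1)) d := by
  induction l with
  | nil => intro d; rfl
  | cons x l ih =>
    intro d
    by_cases hx : x = ""
    · rw [List.foldl_cons, if_neg (by simp [hx]), List.filter_cons, if_neg (by simp [hx])]
      exact ih d
    · rw [List.foldl_cons, if_pos hx, List.filter_cons, if_pos (by simpa using hx),
        List.foldl_cons]
      exact ih _

theorem pv_ofList_filter (p : String → Bool) (xs : List String) :
    PySem.Set.ofList (xs.filter p) = (PySem.Set.ofList xs).filter p := by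
  simpa using pv_foldl_add_filter p xs []

-- Characterisation of A: first-appearance dedup filtered by truthiness and count ≥ threshold.
theorem pv_A_char (items : List String) (threshold : Int) :
    get_dominant_items_py items threshold
      = (PySem.List.dedup items).filter
          (fun k => decide (k ≠ "" ∧ threshold ≤ (PySem.List.count items k : Int))) := by
  unfold get_dominant_items_py
  by_cases hnil : items = []
  · subst hnil; rfl
  · simp only [hnil, if_false]
    rw [pv_foldl_skip_falsy,
      PySem.Dict.foldl_insert_getD_add_one_eq_counter, PySem.Dict.items_counter,
      List.filter_map, List.map_map, pv_ofList_filter, List.filter_filter,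
      PySem.List.dedup_eq_ofList]
    rw [show ((·.1) ∘ fun k => (k, (List.count k (items.filter fun x => decide (x ≠ "")) : Int)))
        = id from rfl, List.map_id]
    apply List.filter_congr
    intro k _
    simp only [Function.comp]
    by_cases hk : k = ""
    · simp [hk]
    · simp [hk, List.count_filter, PySem.List.count_eq]

-- dedup of a cons: the head followed by the dedup of the tail with all copies of the head removed.
theorem pv_foldl_add_cons (x : String) (l : List String) : ∀ (acc : List String), x ∉ l →
    List.foldl PySem.Set.add (x :: acc) l = x :: List.foldl PySem.Set.add acc l := by
  induction l with
  | nil => intro acc _; rfl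
  | cons y l ih =>
    intro acc hx
    have hyx : y ≠ x := fun h => hx (h ▸ List.mem_cons_self)
    have hxl : x ∉ l := fun h => hx (List.mem_cons_of_mem _ h)
    by_cases hm : y ∈ acc
    · simp [PySem.Set.add, PySem.Set.contains, hm, hyx, ih _ hxl]
    · simp only [List.foldl_cons, PySem.Set.add, PySem.Set.contains, List.contains_eq_mem]
      simp only [List.mem_cons, hyx, hm, or_false, decide_false, Bool.false_eq_true, if_false]
      rw [show x :: acc ++ [y] = x :: (acc ++ [y]) from rfl, ih _ hxl]

theorem pv_foldl_add_skip (x : String) (l : List String) : ∀ (acc : List String), x ∈ acc →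
    List.foldl PySem.Set.add acc l = List.foldl PySem.Set.add acc (l.filter (fun y => y ≠ x)) := by
  induction l with
  | nil => intro acc _; rfl
  | cons y l ih =>
    intro acc hx
    by_cases hyx : y = x
    · subst hyx
      simp only [List.filter_cons, ne_eq, not_true, decide_false, Bool.false_eq_true, if_false,
        List.foldl_cons, PySem.Set.add, PySem.Set.contains, List.contains_eq_mem, hx,
        decide_true, if_true]
      exact ih acc hx
    · simp only [List.filter_cons, ne_eq, hyx, not_false_iff, decide_true, if_true,
        List.foldl_cons]
      by_cases hm : y ∈ acc
      · simp only [PySem.Set.add, PySem.Set.contains, List.contains_eq_mem, hm, decide_true,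
          if_true]
        exact ih acc hx
      · simp only [PySem.Set.add, PySem.Set.contains, List.contains_eq_mem, hm, decide_false,
          Bool.false_eq_true, if_false]
        exact ih (acc ++ [y]) (List.mem_append_left _ hx)

theorem pv_dedup_cons (x : String) (l : List String) :
    PySem.List.dedup (x :: l) = x :: PySem.List.dedup (l.filter (fun y => y ≠ x)) := by
  have hnot : x ∉ l.filter (fun y => y ≠ x) := by
    intro h
    have := List.of_mem_filter h
    simp at this
  calc PySem.List.dedup (x :: l)
      = List.foldl PySem.Set.add [x] l := by
        simp [PySem.List.dedup_eq_ofList, PySem.Set.ofList_eq_foldl, PySem.Set.add,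
          PySem.Set.contains]
    _ = List.foldl PySem.Set.add [x] (l.filter (fun y => y ≠ x)) :=
        pv_foldl_add_skip x l [x] List.mem_cons_self
    _ = x :: List.foldl PySem.Set.add [] (l.filter (fun y => y ≠ x)) :=
        pv_foldl_add_cons x _ [] hnot
    _ = x :: PySem.List.dedup (l.filter (fun y => y ≠ x)) := by
        simp [PySem.List.dedup_eq_ofList, PySem.Set.ofList_eq_foldl]

-- length of the filtered tail + multiplicity of the removed head = length of the tail.
theorem pv_len_filter_count (head : String) (tail : List String) :
    (tail.filter (fun x => decide (x ≠ head))).length + tail.count head = tail.length := by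
  induction tail with
  | nil => rfl
  | cons y t iht =>
    by_cases hy : y = head
    · subst hy
      simp only [List.filter_cons, List.count_cons, ne_eq, List.length_cons] at iht ⊢
      simp only [not_true_eq_false, decide_false, Bool.false_eq_true, if_false, BEq.rfl, if_true]
      omega
    · have hb : (y == head) = false := by simpa using hy
      simp only [List.filter_cons, List.count_cons, ne_eq, List.length_cons] at iht ⊢
      simp only [hy, not_false_iff, decide_true, if_true, hb, Bool.false_eq_true, if_false,
        List.length_cons]
      omega

-- Characterisation of B's loop: at each step the head's count is the length drop, and
-- removing all copies of the head leaves every other element's count unchanged.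
theorem pv_B_char (threshold : Int) (acc rest : List String) :
    pvAltLoop threshold acc rest
      = acc ++ (PySem.List.dedup rest).filter
          (fun k => decide (k ≠ "" ∧ threshold ≤ (PySem.List.count rest k : Int))) := by
  induction acc, rest using pvAltLoop.induct threshold with
  | case1 acc => simp [pvAltLoop, PySem.List.dedup]
  | case2 acc head tail remaining hcond ih =>
    rw [pvAltLoop]
    have hrem : remaining = tail.filter (fun x => decide (x ≠ head)) := by
      show (tail.attach.filter fun x => decide (x.1 ≠ head)).unattach = _
      rw [List.unattach_filter (g := fun x => decide (x ≠ head)) (hf := fun x h => rfl),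
        List.unattach_attach]
    rw [hrem] at hcond ih
    have hlen := pv_len_filter_count head tail
    rw [if_pos hcond, ih, pv_dedup_cons]
    have hphead : (decide (head ≠ "" ∧ threshold ≤ (PySem.List.count (head :: tail) head : Int))) = true := by
      simp only [PySem.List.count_eq, List.count_cons_self, decide_eq_true_eq]
      refine ⟨hcond.1, ?_⟩
      have := hcond.2
      push_cast
      omega
    rw [List.filter_cons, hphead, if_pos rfl]
    rw [List.append_assoc]
    congr 1
    rw [List.singleton_append]
    congr 1
    apply List.filter_congr
    intro k hk
    have hkrem : k ∈ tail.filter (fun x => decide (x ≠ head)) := by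
      rw [← PySem.List.mem_dedup]; exact hk
    have hkne : k ≠ head := by
      have := List.of_mem_filter hkrem
      simpa using this
    have hcf : List.count k (tail.filter (fun x => decide (x ≠ head))) = List.count k tail := by
      apply List.count_filter
      simpa using hkne
    simp only [PySem.List.count_eq, hcf, List.count_cons]
    simp [Ne.symm hkne]
  | case3 acc head tail remaining hcond ih =>
    rw [pvAltLoop]
    have hrem : remaining = tail.filter (fun x => decide (x ≠ head)) := by
      show (tail.attach.filter fun x => decide (x.1 ≠ head)).unattach = _
      rw [List.unattach_filter (g := fun x => decide (x ≠ head)) (hf := fun x h => rfl),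
        List.unattach_attach]
    rw [hrem] at hcond ih
    have hlen := pv_len_filter_count head tail
    rw [if_neg hcond, ih, pv_dedup_cons]
    have hphead : (decide (head ≠ "" ∧ threshold ≤ (PySem.List.count (head :: tail) head : Int))) = false := by
      simp only [PySem.List.count_eq, List.count_cons_self, decide_eq_false_iff_not, not_and, not_le]
      intro hne
      by_contra hle
      simp only [not_lt] at hle
      apply hcond
      refine ⟨hne, ?_⟩
      push_cast at hle ⊢
      omega
    rw [List.filter_cons, hphead]
    simp only [Bool.false_eq_true, if_false]
    congr 1
    apply List.filter_congr
    intro k hk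
    have hkrem : k ∈ tail.filter (fun x => decide (x ≠ head)) := by
      rw [← PySem.List.mem_dedup]; exact hk
    have hkne : k ≠ head := by
      have := List.of_mem_filter hkrem
      simpa using this
    have hcf : List.count k (tail.filter (fun x => decide (x ≠ head))) = List.count k tail := by
      apply List.count_filter
      simpa using hkne
    simp only [PySem.List.count_eq, hcf, List.count_cons]
    simp [Ne.symm hkne]

-- ===== VERDICT (by name: the statement is the Claim_ definition above) =====
theorem get_dominant_items_py_spec : Claim_equal_get_dominant_items_py := by
  intro items threshold _
  unfold Spec_get_dominant_items_py get_dominant_items_py_alt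
  rw [pv_A_char, pv_B_char]
  simp
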